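-- pv_equiv track=rewrite | github.com/Pixelatory/cosc4f90 | util.py | bitsToStrings
-- ===== SOURCE A (Python) =====
-- def bitsToStrings(bitmatrix, seq):
--     """Converts a list of sequences into a list of strings with indels, according to the bitmatrix provided.
--
--     Note: A bit of 0 means a character, and a bit of 1 means indel.
--     However, if the number of 0 bits exceeds the length of the sequence,
--     indels will be inserted instead.
--
--     :type bitmatrix: List[List[int]]
--     :type seq: List[str]
--     :rtype: List[str]
--     """
--     result = []
--     i = 0
--     for bitlist in bitmatrix:
--         j = 0
--         result.append("")
--         for bit in bitlist:
--             if bit == 0 and j < len(seq[i]):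
--                 result[len(result) - 1] += seq[i][j]
--                 j += 1
--             else:
--                 result[len(result) - 1] += "-"
--         i = i + 1
--     return result
-- ===== SOURCE B (Python) =====
-- def bitsToStrings(bitmatrix, seq):
--     result = []
--     for i, bitlist in enumerate(bitmatrix):
--         chars = ['-'] * len(bitlist)
--         zeros = [k for k, bit in enumerate(bitlist) if bit == 0]
--         if zeros:
--             for k, c in zip(zeros, seq[i]):
--                 chars[k] = c
--         result.append(''.join(chars))
--     return result
-- ===== Notes on version B (the rewrite author's own statement) =====
-- stated objective: alternative
-- what changed: Replaces A's moving j-pointer with per-bit string concatenation by a two-phase pass per row: collect the zero-bit positions, allocate a '-' list, fill the zero slots by zipping positions with the sequence, then join once per row.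
import Mathlib
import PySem

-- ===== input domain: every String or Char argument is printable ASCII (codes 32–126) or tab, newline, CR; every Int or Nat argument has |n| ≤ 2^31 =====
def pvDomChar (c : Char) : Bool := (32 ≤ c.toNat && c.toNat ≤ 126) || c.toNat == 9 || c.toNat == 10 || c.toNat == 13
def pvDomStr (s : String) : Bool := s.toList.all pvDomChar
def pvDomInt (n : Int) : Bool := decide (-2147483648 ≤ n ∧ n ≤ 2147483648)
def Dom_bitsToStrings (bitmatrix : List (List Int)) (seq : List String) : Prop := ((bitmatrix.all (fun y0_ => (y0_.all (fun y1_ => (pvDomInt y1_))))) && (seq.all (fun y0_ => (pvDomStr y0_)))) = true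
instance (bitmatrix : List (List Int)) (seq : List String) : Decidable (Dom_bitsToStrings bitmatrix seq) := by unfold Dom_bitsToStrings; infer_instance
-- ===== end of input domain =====

-- B replaces A's moving j-pointer/per-bit append by a zeros-positions-then-fill two-phase pass per row ("alternative"; return value only, no mutation).

-- ===== PORT A =====
-- inner loop of A over one bitlist: state (row built so far, j)
def pvARow (s : List Char) (bitlist : List Int) : List Char :=
  (bitlist.foldl (fun (st : List Char × Nat) bit =>
     if bit = 0 ∧ st.2 < s.length then (st.1 ++ [s.getD st.2 '-'], st.2 + 1)
     else (st.1 ++ ['-'], st.2)) ([], 0)).1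

def bitsToStrings (bitmatrix : List (List Int)) (seq : List String) : List String :=
  (bitmatrix.foldl (fun (st : List String × Nat) bitlist =>
     (st.1 ++ [String.ofList (pvARow (seq.getD st.2 "").toList bitlist)], st.2 + 1)) ([], 0)).1

-- ===== PORT B =====
-- the fill loop: for k, c in zip(zeros, seq[i]): chars[k] = c
def pvFill (arr : List Char) (l : List (Int × Char)) : List Char :=
  l.foldl (fun a kc => a.set kc.1.toNat kc.2) arr

-- zeros = [k for k, bit in enumerate(bitlist) if bit == 0]
def pvZerosOf (bitlist : List Int) : List Int :=
  (PySem.List.enumerate bitlist).filterMap (fun kb => if kb.2 = 0 then some kb.1 else none)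

def pvBRow (seq : List String) (i : Int) (bitlist : List Int) : List Char :=
  if pvZerosOf bitlist ≠ [] then
    pvFill (List.replicate bitlist.length '-') ((pvZerosOf bitlist).zip (PySem.List.pyGetD seq i "").toList)
  else List.replicate bitlist.length '-' 

def bitsToStrings_alt (bitmatrix : List (List Int)) (seq : List String) : List String :=
  (PySem.List.enumerate bitmatrix).foldl
    (fun result ib => result ++ [String.ofList (pvBRow seq ib.1 ib.2)]) []

-- ===== PRECONDITION & SPEC =====
-- Pre_ excludes inputs where Python A raises IndexError: a row with a zero bit whose row index is ≥ len(seq) (B raises there too).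
def Pre_bitsToStrings (bitmatrix : List (List Int)) (seq : List String) : Prop :=
  ∀ i : Nat, i < bitmatrix.length → (∃ b ∈ bitmatrix.getD i [], b = 0) → i < seq.length
instance (bitmatrix : List (List Int)) (seq : List String) : Decidable (Pre_bitsToStrings bitmatrix seq) := by unfold Pre_bitsToStrings; infer_instance

def pvWitness_bitsToStrings : List (List Int) × List String := ([[0, 1, 0], [1, 1]], ["ab"])

def Spec_bitsToStrings (bitmatrix : List (List Int)) (seq : List String) (out : List String) : Prop := out = bitsToStrings_alt bitmatrix seq
instance (bitmatrix : List (List Int)) (seq : List String) (out : List String) : Decidable (Spec_bitsToStrings bitmatrix seq out) := by unfold Spec_bitsToStrings; infer_instance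

-- ===== CLAIM (what is proved, stated in full; the proofs are below) =====
def Claim_equal_bitsToStrings : Prop := ∀ (bitmatrix : List (List Int)) (seq : List String), Dom_bitsToStrings bitmatrix seq → Pre_bitsToStrings bitmatrix seq → Spec_bitsToStrings bitmatrix seq (bitsToStrings bitmatrix seq)

-- ===== LEMMAS AND PROOFS =====

-- reference row function both rows are proved equal to
def pvRowSpec : List Int → List Char → List Char
  | [], _ => []
  | b :: bs, s =>
    if b = 0 then
      match s with
      | [] => '-' :: pvRowSpec bs []
      | c :: s' => c :: pvRowSpec bs s'
    else '-' :: pvRowSpec bs s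

lemma pvRowSpec_nil (bs : List Int) : pvRowSpec bs [] = List.replicate bs.length '-' := by
  induction bs with
  | nil => rfl
  | cons b bs ih => by_cases hb : b = 0 <;> simp [pvRowSpec, hb, ih, List.replicate_succ]

-- pvZerosOf with a general enumerate start, for the induction
def pvZeros (bs : List Int) (s : Int) : List Int :=
  (PySem.List.enumerate bs s).filterMap (fun kb => if kb.2 = 0 then some kb.1 else none)

lemma pvZeros_cons' (b : Int) (bs : List Int) (s : Int) :
    pvZeros (b :: bs) s = if b = 0 then s :: pvZeros bs (s + 1) else pvZeros bs (s + 1) := by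
  unfold pvZeros
  rw [PySem.List.enumerate_cons, List.filterMap_cons]
  by_cases hb : b = 0 <;> simp [hb]

lemma pvZeros_succ (bs : List Int) (s : Int) :
    pvZeros bs (s + 1) = (pvZeros bs s).map (· + 1) := by
  induction bs generalizing s with
  | nil => rfl
  | cons b bs ih =>
    rw [pvZeros_cons', pvZeros_cons', ih (s + 1)]
    by_cases hb : b = 0 <;> simp [hb]

lemma pvZeros_nonneg (bs : List Int) (s : Int) (hs : 0 ≤ s) :
    ∀ p ∈ pvZeros bs s, 0 ≤ p := by
  intro p hp
  simp only [pvZeros, List.mem_filterMap] at hp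
  obtain ⟨kb, hkb, hf⟩ := hp
  obtain ⟨k, hk, rfl⟩ := (PySem.List.mem_enumerate_iff _ _ _).mp hkb
  split at hf
  · simp only [Option.some.injEq] at hf
    omega
  · simp at hf

lemma pvFill_cons (arr : List Char) (k : Int) (c : Char) (l : List (Int × Char)) :
    pvFill arr ((k, c) :: l) = pvFill (arr.set k.toNat c) l := rfl

lemma pvFill_shift (ps : List Int) (cs : List Char) (d : Char) (arr : List Char)
    (hps : ∀ p ∈ ps, 0 ≤ p) :
    pvFill (d :: arr) ((ps.map (· + 1)).zip cs) = d :: pvFill arr (ps.zip cs) := by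
  induction ps generalizing cs arr with
  | nil => rfl
  | cons p ps ih =>
    cases cs with
    | nil => rfl
    | cons c cs =>
      have hp : 0 ≤ p := hps p (by simp)
      have ht : (p + 1).toNat = p.toNat + 1 := by omega
      rw [List.map_cons, List.zip_cons_cons, List.zip_cons_cons, pvFill_cons, pvFill_cons, ht,
        List.set_cons_succ]
      exact ih cs (arr.set p.toNat c) (fun q hq => hps q (by simp [hq]))

lemma pvZeros_cons (b : Int) (bs : List Int) :
    pvZeros (b :: bs) 0
      = if b = 0 then 0 :: (pvZeros bs 0).map (· + 1) else (pvZeros bs 0).map (· + 1) := by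
  rw [pvZeros_cons', pvZeros_succ bs 0]

lemma pvFill_rowSpec (bs : List Int) (s : List Char) :
    pvFill (List.replicate bs.length '-') ((pvZeros bs 0).zip s) = pvRowSpec bs s := by
  induction bs generalizing s with
  | nil => cases s <;> rfl
  | cons b bs ih =>
    rw [pvZeros_cons]
    by_cases hb : b = 0
    · rw [if_pos hb]
      cases s with
      | nil => simp [pvFill, pvRowSpec_nil]
      | cons c s' =>
        rw [List.zip_cons_cons, pvFill_cons, List.length_cons, List.replicate_succ,
          Int.toNat_zero, List.set_cons_zero,
          pvFill_shift _ _ _ _ (pvZeros_nonneg bs 0 le_rfl), ih s']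
        simp [pvRowSpec, hb]
    · rw [if_neg hb, List.length_cons, List.replicate_succ,
        pvFill_shift _ _ _ _ (pvZeros_nonneg bs 0 le_rfl), ih s]
      simp [pvRowSpec, hb]

lemma pvBRow_eq_rowSpec (seq : List String) (i : Int) (bs : List Int) :
    pvBRow seq i bs = pvRowSpec bs (PySem.List.pyGetD seq i "").toList := by
  have hz : pvZerosOf bs = pvZeros bs 0 := rfl
  unfold pvBRow
  split
  · rw [hz]; exact pvFill_rowSpec bs _
  · next h =>
    rw [not_not, hz] at h
    rw [← pvFill_rowSpec bs (PySem.List.pyGetD seq i "").toList, h]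
    rfl

lemma pvARow_aux (s : List Char) (bs : List Int) :
    ∀ (j : Nat) (acc : List Char),
      (bs.foldl (fun (st : List Char × Nat) bit =>
        if bit = 0 ∧ st.2 < s.length then (st.1 ++ [s.getD st.2 '-'], st.2 + 1)
        else (st.1 ++ ['-'], st.2)) (acc, j)).1 = acc ++ pvRowSpec bs (s.drop j) := by
  induction bs with
  | nil => intro j acc; simp [pvRowSpec]
  | cons b bs ih =>
    intro j acc
    simp only [List.foldl_cons]
    by_cases h : b = 0 ∧ j < s.length
    · rw [if_pos h]
      rw [ih (j + 1) (acc ++ [s.getD j '-'])]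
      have hd : s.drop j = s[j] :: s.drop (j + 1) := List.drop_eq_getElem_cons h.2
      rw [hd]
      simp [pvRowSpec, h.1, List.getD, List.getElem?_eq_getElem h.2]
    · rw [if_neg h]
      rw [ih j (acc ++ ['-'])]
      have : pvRowSpec (b :: bs) (s.drop j) = '-' :: pvRowSpec bs (s.drop j) := by
        by_cases hb : b = 0
        · have hj : s.length ≤ j := by
            by_contra hlt; exact h ⟨hb, by omega⟩
          have hnil : s.drop j = [] := List.drop_eq_nil_of_le hj
          simp [hnil, pvRowSpec, hb]
        · simp [pvRowSpec, hb]
      rw [this]; simp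

lemma pvARow_eq_rowSpec (s : List Char) (bs : List Int) :
    pvARow s bs = pvRowSpec bs s := by
  have := pvARow_aux s bs 0 []
  simpa [pvARow] using this

-- reference outer recursion
def pvOuter (seq : List String) : List (List Int) → Nat → List String
  | [], _ => []
  | r :: rs, i => String.ofList (pvRowSpec r (seq.getD i "").toList) :: pvOuter seq rs (i + 1)

lemma pvA_outer (seq : List String) (rows : List (List Int)) :
    ∀ (i : Nat) (acc : List String),
      (rows.foldl (fun (st : List String × Nat) bitlist =>
        (st.1 ++ [String.ofList (pvARow (seq.getD st.2 "").toList bitlist)], st.2 + 1)) (acc, i)).1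
      = acc ++ pvOuter seq rows i := by
  induction rows with
  | nil => intro i acc; simp [pvOuter]
  | cons r rs ih =>
    intro i acc
    simp only [List.foldl_cons]
    rw [ih (i + 1) _]
    simp [pvOuter, pvARow_eq_rowSpec]

lemma pvB_outer (seq : List String) (rows : List (List Int)) :
    ∀ (i : Nat) (acc : List String),
      ((PySem.List.enumerate rows (i : Int)).foldl
        (fun result ib => result ++ [String.ofList (pvBRow seq ib.1 ib.2)]) acc)
      = acc ++ pvOuter seq rows i := by
  induction rows with
  | nil => intro i acc; simp [PySem.List.enumerate_nil, pvOuter]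
  | cons r rs ih =>
    intro i acc
    rw [PySem.List.enumerate_cons]
    simp only [List.foldl_cons]
    have hcast : ((i : Int) + 1) = ((i + 1 : Nat) : Int) := by push_cast; ring
    rw [hcast, ih (i + 1) _]
    simp [pvOuter, pvBRow_eq_rowSpec, PySem.List.pyGetD_natCast]

-- ===== VERDICT (by name: the statement is the Claim_ definition above) =====
theorem bitsToStrings_spec : Claim_equal_bitsToStrings := by
  intro bitmatrix seq _ _
  unfold Spec_bitsToStrings bitsToStrings bitsToStrings_alt
  rw [pvA_outer seq bitmatrix 0 []]
  have h := pvB_outer seq bitmatrix 0 []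
  simpa using h.symm
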